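-- pv_equiv track=rewrite | github.com/dellison/CS_Corpus | is_language.py | extract_ngrams
-- ===== SOURCE A (Python) =====
-- def extract_ngrams(line):
--     """Messy extraction of 4,5-grams from a line. Should be done functionally"""
--     # put each type of ngram in list of lists
--     ngrams=[[],[]]
--     for word in line:
--         # add anchoring symbols and extract fourgrams
--         word= '^^^^'+word+'$$$$'
--         ngrams[0].append([word[char]
--                          +word[char+1]
--                          +word[char+2]
--                          +word[char+3]
--                          for char in range(len(word)-3)])
--         # extract fivegrams
--         ngrams[1].append([word[char]
--                          +word[char+1]
--                          +word[char+2]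
--                          +word[char+3]
--                          +word[char+4]
--                          for char in range(len(word)-4)])
--     # flatten the list of each type of ngrams
--     return [flatten_list(ngrams[tlist]) for tlist in range(len(ngrams))]
--
-- def flatten_list(list_of_lists):
--     """Takes a lits of lists and return a single (flattened) list"""
--     return [item for sublist in list_of_lists for item in sublist]
-- ===== SOURCE B (Python) =====
-- def extract_ngrams(line):
--     """Extract 4,5-grams from a line: one pass, flat lists, direct slicing."""
--     fourgrams = []
--     fivegrams = []
--     for word in line:
--         w = '^^^^' + word + '$$$$'
--         for i in range(len(w) - 3):
--             fourgrams.append(w[i:i+4])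
--         for i in range(len(w) - 4):
--             fivegrams.append(w[i:i+5])
--     return [fourgrams, fivegrams]
-- ===== Notes on version B (the rewrite author's own statement) =====
-- stated objective: simpler
-- what changed: B fills two flat result lists in a single pass by appending slices w[i:i+4]/w[i:i+5] directly, instead of building per-word sublists of character-by-character concatenations and flattening them afterwards.
import Mathlib
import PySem

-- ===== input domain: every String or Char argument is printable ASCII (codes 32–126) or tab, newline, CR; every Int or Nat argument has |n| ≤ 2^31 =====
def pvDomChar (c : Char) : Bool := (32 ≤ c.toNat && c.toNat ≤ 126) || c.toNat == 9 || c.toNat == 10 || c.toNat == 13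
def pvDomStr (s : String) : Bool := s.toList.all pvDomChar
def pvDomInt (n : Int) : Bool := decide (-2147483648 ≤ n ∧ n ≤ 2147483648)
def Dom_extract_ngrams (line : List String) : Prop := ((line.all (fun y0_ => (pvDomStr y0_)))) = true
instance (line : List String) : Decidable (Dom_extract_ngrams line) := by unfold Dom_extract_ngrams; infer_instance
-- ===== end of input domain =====

-- B changes the decomposition: one pass appending slices to two flat lists instead of
-- per-word sublists of char-by-char concatenations flattened afterwards (objective: simpler).

-- ===== PORT A =====
-- flatten_list: [item for sublist in list_of_lists for item in sublist]
def flatten_list (list_of_lists : List (List String)) : List String :=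
  list_of_lists.flatMap (fun sublist => sublist)

-- loop body of A: anchors the word and appends the per-word 4-gram and 5-gram sublists.
-- word[char] is ported with pyGetD: every index produced by range(len(w)-3) / range(len(w)-4)
-- is in range (len w ≥ 8), so Python never raises here and the default is never used.
def pvStepA (ng : List (List String) × List (List String)) (word : String) :
    List (List String) × List (List String) :=
  let w : List Char := ('^' :: '^' :: '^' :: '^' :: word.toList) ++ ['$', '$', '$', '$']
  (ng.1 ++ [(PySem.List.pyRange 0 ((w.length : Int) - 3) 1).map (fun c =>
      String.ofList [PySem.List.pyGetD w c ' ',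
                 PySem.List.pyGetD w (c + 1) ' ',
                 PySem.List.pyGetD w (c + 2) ' ',
                 PySem.List.pyGetD w (c + 3) ' '])],
   ng.2 ++ [(PySem.List.pyRange 0 ((w.length : Int) - 4) 1).map (fun c =>
      String.ofList [PySem.List.pyGetD w c ' ',
                 PySem.List.pyGetD w (c + 1) ' ',
                 PySem.List.pyGetD w (c + 2) ' ',
                 PySem.List.pyGetD w (c + 3) ' ',
                 PySem.List.pyGetD w (c + 4) ' '])])

def extract_ngrams (line : List String) : List (List String) :=
  let ngrams := line.foldl pvStepA ([], [])
  [flatten_list ngrams.1, flatten_list ngrams.2]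

-- ===== PORT B =====
-- loop body of B: anchors the word and appends the slices w[i:i+4] / w[i:i+5] directly
-- to the two flat accumulators.
def pvStepB (acc : List String × List String) (word : String) :
    List String × List String :=
  let w : List Char := ('^' :: '^' :: '^' :: '^' :: word.toList) ++ ['$', '$', '$', '$']
  ((PySem.List.pyRange 0 ((w.length : Int) - 3) 1).foldl
      (fun fs i => fs ++ [String.ofList (PySem.List.slice w (some i) (some (i + 4)))]) acc.1,
   (PySem.List.pyRange 0 ((w.length : Int) - 4) 1).foldl
      (fun fs i => fs ++ [String.ofList (PySem.List.slice w (some i) (some (i + 5)))]) acc.2)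

def extract_ngrams_alt (line : List String) : List (List String) :=
  let p := line.foldl pvStepB ([], [])
  [p.1, p.2]

-- ===== PRECONDITION & SPEC =====
def Spec_extract_ngrams (line : List String) (out : List (List String)) : Prop := out = extract_ngrams_alt line
instance (line : List String) (out : List (List String)) : Decidable (Spec_extract_ngrams line out) := by unfold Spec_extract_ngrams; infer_instance

-- ===== CLAIM (what is proved, stated in full; the proofs are below) =====
def Claim_equal_extract_ngrams : Prop := ∀ (line : List String), Dom_extract_ngrams line → Spec_extract_ngrams line (extract_ngrams line)

-- ===== LEMMAS AND PROOFS =====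

-- a slice w[i:i+n] whose indices are in range is the list of its characters
lemma slice_four (w : List Char) (i : Int) (h0 : 0 ≤ i) (h4 : i + 4 ≤ (w.length : Int)) :
    PySem.List.slice w (some i) (some (i + 4)) =
      [PySem.List.pyGetD w i ' ', PySem.List.pyGetD w (i + 1) ' ',
       PySem.List.pyGetD w (i + 2) ' ', PySem.List.pyGetD w (i + 3) ' '] := by
  obtain ⟨k, rfl⟩ := Int.eq_ofNat_of_zero_le h0
  have hk : k + 4 ≤ w.length := by exact_mod_cast h4
  have e4 : ((k : Int) + 4) = ((k + 4 : Nat) : Int) := by push_cast; ring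
  have e1 : ((k : Int) + 1) = ((k + 1 : Nat) : Int) := by push_cast; ring
  have e2 : ((k : Int) + 2) = ((k + 2 : Nat) : Int) := by push_cast; ring
  have e3 : ((k : Int) + 3) = ((k + 3 : Nat) : Int) := by push_cast; ring
  rw [e4, e1, e2, e3, PySem.List.slice_natCast]
  simp only [PySem.List.pyGetD_natCast]
  rw [List.getD_eq_getElem _ _ (by omega), List.getD_eq_getElem _ _ (by omega),
      List.getD_eq_getElem _ _ (by omega), List.getD_eq_getElem _ _ (by omega)]
  apply List.ext_getElem
  · simp; omega
  · intro i h1 h2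
    simp only [List.getElem_take, List.getElem_drop]
    simp only [List.length_take, List.length_drop] at h1
    have hi4 : i < 4 := by omega
    interval_cases i <;> rfl

lemma slice_five (w : List Char) (i : Int) (h0 : 0 ≤ i) (h5 : i + 5 ≤ (w.length : Int)) :
    PySem.List.slice w (some i) (some (i + 5)) =
      [PySem.List.pyGetD w i ' ', PySem.List.pyGetD w (i + 1) ' ',
       PySem.List.pyGetD w (i + 2) ' ', PySem.List.pyGetD w (i + 3) ' ',
       PySem.List.pyGetD w (i + 4) ' '] := by
  obtain ⟨k, rfl⟩ := Int.eq_ofNat_of_zero_le h0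
  have hk : k + 5 ≤ w.length := by exact_mod_cast h5
  have e5 : ((k : Int) + 5) = ((k + 5 : Nat) : Int) := by push_cast; ring
  have e1 : ((k : Int) + 1) = ((k + 1 : Nat) : Int) := by push_cast; ring
  have e2 : ((k : Int) + 2) = ((k + 2 : Nat) : Int) := by push_cast; ring
  have e3 : ((k : Int) + 3) = ((k + 3 : Nat) : Int) := by push_cast; ring
  have e4 : ((k : Int) + 4) = ((k + 4 : Nat) : Int) := by push_cast; ring
  rw [e5, e1, e2, e3, e4, PySem.List.slice_natCast]
  simp only [PySem.List.pyGetD_natCast]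
  rw [List.getD_eq_getElem _ _ (by omega), List.getD_eq_getElem _ _ (by omega),
      List.getD_eq_getElem _ _ (by omega), List.getD_eq_getElem _ _ (by omega),
      List.getD_eq_getElem _ _ (by omega)]
  apply List.ext_getElem
  · simp; omega
  · intro i h1 h2
    simp only [List.getElem_take, List.getElem_drop]
    simp only [List.length_take, List.length_drop] at h1
    have hi5 : i < 5 := by omega
    interval_cases i <;> rfl

-- one word: B's inner slice loop produces exactly A's per-word 4-gram sublist, appended flat
lemma word_four (w : List Char) (acc : List String) :
    (PySem.List.pyRange 0 ((w.length : Int) - 3) 1).foldl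
        (fun fs i => fs ++ [String.ofList (PySem.List.slice w (some i) (some (i + 4)))]) acc =
      acc ++ (PySem.List.pyRange 0 ((w.length : Int) - 3) 1).map (fun c =>
        String.ofList [PySem.List.pyGetD w c ' ', PySem.List.pyGetD w (c + 1) ' ',
                   PySem.List.pyGetD w (c + 2) ' ', PySem.List.pyGetD w (c + 3) ' ']) := by
  rw [PySem.List.foldl_append_singleton_eq_map]
  congr 1
  apply List.map_congr_left
  intro i hi
  rw [PySem.List.mem_pyRange_one] at hi
  rw [slice_four w i hi.1 (by omega)]

lemma word_five (w : List Char) (acc : List String) :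
    (PySem.List.pyRange 0 ((w.length : Int) - 4) 1).foldl
        (fun fs i => fs ++ [String.ofList (PySem.List.slice w (some i) (some (i + 5)))]) acc =
      acc ++ (PySem.List.pyRange 0 ((w.length : Int) - 4) 1).map (fun c =>
        String.ofList [PySem.List.pyGetD w c ' ', PySem.List.pyGetD w (c + 1) ' ',
                   PySem.List.pyGetD w (c + 2) ' ', PySem.List.pyGetD w (c + 3) ' ',
                   PySem.List.pyGetD w (c + 4) ' ']) := by
  rw [PySem.List.foldl_append_singleton_eq_map]
  congr 1
  apply List.map_congr_left
  intro i hi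
  rw [PySem.List.mem_pyRange_one] at hi
  rw [slice_five w i hi.1 (by omega)]

lemma flatten_append_singleton (g : List (List String)) (l : List String) :
    flatten_list (g ++ [l]) = flatten_list g ++ l := by
  simp [flatten_list]

-- main invariant: B's fold on the flattened accumulators tracks A's fold
lemma loops_agree (line : List String) (g : List (List String) × List (List String)) :
    line.foldl pvStepB (flatten_list g.1, flatten_list g.2) =
      (flatten_list (line.foldl pvStepA g).1, flatten_list (line.foldl pvStepA g).2) := by
  induction line generalizing g with
  | nil => simp
  | cons word rest ih =>
    simp only [List.foldl_cons]
    have hstep : pvStepB (flatten_list g.1, flatten_list g.2) word =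
        (flatten_list (pvStepA g word).1, flatten_list (pvStepA g word).2) := by
      simp only [pvStepB, pvStepA, word_four, word_five, flatten_append_singleton]
    rw [hstep, ih]

-- ===== VERDICT (by name: the statement is the Claim_ definition above) =====
theorem extract_ngrams_spec : Claim_equal_extract_ngrams := by
  intro line _
  show extract_ngrams line = extract_ngrams_alt line
  simp only [extract_ngrams, extract_ngrams_alt]
  have h := loops_agree line ([], [])
  simp only [flatten_list, List.flatMap_nil] at h ⊢
  rw [h]
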